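-- pv_equiv track=rewrite | github.com/leandro-alv/IC-UERJ | SA/SA-test2.py | column_cost
-- ===== SOURCE A (Python) =====
-- import operator
-- from itertools import zip_longest, combinations
--
-- def column_cost(column):
--     """Calculates the cost of the column using the sum-of-pairs(SP).
--     Each match is +1, mismatch -1 and gap -2. Two gaps is 0, to avoid extra
--     penalization.
--     """
--     sp = 0
--     for comb in combinations(column, 2):
--         if operator.eq(comb[0], comb[1]):
--             if operator.ne(comb[0], '-'):
--                 sp += 1
--         else:
--             if operator.ne(comb[0], '-') and operator.ne(comb[1], '-'):
--                 sp -= 1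
--             else:
--                 sp -= 2
--     return sp
-- ===== SOURCE B (Python) =====
-- def column_cost(column):
--     """Sum-of-pairs column cost in one pass: count equal non-gap pairs with a
--     running dict of symbol counts, then use closed-form pair counts for the
--     mismatch (-1) and gap (-2) pairs."""
--     counts = {}
--     matches = 0
--     for s in column:
--         c = counts.get(s, 0)
--         if s != '-':
--             matches += c
--         counts[s] = c + 1
--     g = counts.get('-', 0)
--     m = len(column) - g
--     return 2 * matches - m * (m - 1) // 2 - 2 * g * m
-- ===== Notes on version B (the rewrite author's own statement) =====
-- stated objective: faster
-- what changed: Replaces the O(n^2) loop over all pairs (itertools.combinations) by a single pass that counts equal non-gap pairs with a running count dict, combining it with closed-form counts for mismatch and gap pairs.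
import Mathlib
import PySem

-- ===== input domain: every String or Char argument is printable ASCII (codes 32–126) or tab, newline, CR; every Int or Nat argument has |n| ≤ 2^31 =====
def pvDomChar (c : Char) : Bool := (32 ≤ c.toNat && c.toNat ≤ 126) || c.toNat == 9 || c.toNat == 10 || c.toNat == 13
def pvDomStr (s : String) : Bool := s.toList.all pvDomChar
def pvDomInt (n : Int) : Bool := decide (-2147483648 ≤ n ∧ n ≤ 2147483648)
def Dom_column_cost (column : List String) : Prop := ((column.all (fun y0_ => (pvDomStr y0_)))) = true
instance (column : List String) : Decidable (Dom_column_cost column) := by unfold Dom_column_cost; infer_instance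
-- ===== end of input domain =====

-- B replaces A's O(n^2) loop over all pairs by one O(n) counting pass plus closed-form pair counts (timed asymptotically faster).


-- ===== PORT A =====
-- itertools.combinations(column, 2) in order
def pvPairs : List String → List (String × String)
  | [] => []
  | x :: xs => xs.map (fun y => (x, y)) ++ pvPairs xs

def column_cost (column : List String) : Int :=
  (pvPairs column).foldl
    (fun sp comb =>
      if comb.1 = comb.2 then
        (if comb.1 ≠ "-" then sp + 1 else sp)
      else
        (if comb.1 ≠ "-" ∧ comb.2 ≠ "-" then sp - 1 else sp - 2))
    0

-- ===== PORT B =====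
-- the `for s in column` loop of Source B: running counts dict and matches accumulator
def pvCountLoop : PySem.Dict String Int → Int → List String → PySem.Dict String Int × Int
  | d, mtc, [] => (d, mtc)
  | d, mtc, s :: rest =>
      let c := d.getD s 0
      pvCountLoop (d.insert s (c + 1)) (if s ≠ "-" then mtc + c else mtc) rest

def column_cost_alt (column : List String) : Int :=
  let r := pvCountLoop PySem.Dict.empty 0 column
  let g := r.1.getD "-" 0
  let m := (column.length : Int) - g
  2 * r.2 - PySem.Int.floordiv (m * (m - 1)) 2 - 2 * g * m

-- ===== PRECONDITION & SPEC =====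
def Spec_column_cost (column : List String) (out : Int) : Prop := out = column_cost_alt column
instance (column : List String) (out : Int) : Decidable (Spec_column_cost column out) := by unfold Spec_column_cost; infer_instance

-- ===== CLAIM (what is proved, stated in full; the proofs are below) =====
def Claim_equal_column_cost : Prop := ∀ (column : List String), Dom_column_cost column → Spec_column_cost column (column_cost column)

-- ===== LEMMAS AND PROOFS =====

-- pairwise score of A, as a value
def pvScore (c : String × String) : Int :=
  if c.1 = c.2 then (if c.1 ≠ "-" then 1 else 0)
  else (if c.1 ≠ "-" ∧ c.2 ≠ "-" then -1 else -2)

-- equal non-gap pairs, counted head-against-tail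
def pvPc : List String → Int
  | [] => 0
  | x :: xs => (if x = "-" then 0 else (xs.count x : Int)) + pvPc xs

-- sum of stored counts of the non-gap elements of xs
def pvS (d : PySem.Dict String Int) (xs : List String) : Int :=
  (xs.map (fun y => if y = "-" then 0 else d.getD y 0)).sum

-- gap count as Int
def pvG (xs : List String) : Int := (xs.count "-" : Int)
-- non-gap count as Int
def pvM (xs : List String) : Int := (xs.length : Int) - pvG xs

theorem pv_foldl_score (l : List (String × String)) (a : Int) :
    l.foldl
      (fun sp comb =>
        if comb.1 = comb.2 then
          (if comb.1 ≠ "-" then sp + 1 else sp)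
        else
          (if comb.1 ≠ "-" ∧ comb.2 ≠ "-" then sp - 1 else sp - 2)) a
      = a + (l.map pvScore).sum := by
  induction l generalizing a with
  | nil => simp
  | cons c l ih =>
      simp only [List.foldl_cons, List.map_cons, List.sum_cons, ih, pvScore]
      split_ifs <;> ring

theorem pv_loop_fst (xs : List String) (d : PySem.Dict String Int) (m : Int) :
    (pvCountLoop d m xs).1 = xs.foldl (fun d x => d.insert x (d.getD x 0 + 1)) d := by
  induction xs generalizing d m with
  | nil => rfl
  | cons x xs ih => simp only [pvCountLoop, List.foldl_cons, ih]

theorem pv_count_cons (x y : String) (ys : List String) :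
    (((y :: ys).count x : Nat) : Int) = (ys.count x : Int) + (if x = y then 1 else 0) := by
  by_cases h : x = y
  · simp [List.count_cons, h]
  · simp [List.count_cons, h, Ne.symm h]

theorem pvG_cons (y : String) (ys : List String) :
    pvG (y :: ys) = pvG ys + (if y = "-" then 1 else 0) := by
  rw [pvG, pvG, pv_count_cons]
  by_cases hy : y = "-"
  · simp [hy]
  · simp [hy, Ne.symm hy]

theorem pvM_cons (y : String) (ys : List String) :
    pvM (y :: ys) = pvM ys + (if y = "-" then 0 else 1) := by
  simp only [pvM, pvG_cons, List.length_cons]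
  split_ifs <;> push_cast <;> ring

theorem pvS_cons (d : PySem.Dict String Int) (y : String) (ys : List String) :
    pvS d (y :: ys) = (if y = "-" then 0 else d.getD y 0) + pvS d ys := by
  simp [pvS]

theorem pvS_insert (xs : List String) (d : PySem.Dict String Int) (x : String) :
    pvS (d.insert x (d.getD x 0 + 1)) xs
      = pvS d xs + (if x = "-" then 0 else (xs.count x : Int)) := by
  induction xs with
  | nil => simp [pvS]
  | cons y ys ih =>
      rw [pvS_cons, pvS_cons, ih, PySem.Dict.getD_insert, pv_count_cons]
      rcases eq_or_ne x y with hxy | hxy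
      · subst hxy
        by_cases hx : x = "-" <;> simp [hx] <;> ring
      · have hyx : y ≠ x := fun h => hxy h.symm
        by_cases hy : y = "-"
        · subst hy; simp [hxy, hyx] <;> ring
        · simp [hxy, hyx, hy] <;> ring

theorem pv_loop_snd (xs : List String) (d : PySem.Dict String Int) (m : Int) :
    (pvCountLoop d m xs).2 = m + pvS d xs + pvPc xs := by
  induction xs generalizing d m with
  | nil => simp [pvCountLoop, pvS, pvPc]
  | cons x xs ih =>
      show (pvCountLoop (d.insert x (d.getD x 0 + 1))
          (if x ≠ "-" then m + d.getD x 0 else m) xs).2 = _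
      rw [ih, pvS_insert, pvS_cons]
      simp only [pvPc]
      by_cases hx : x = "-" <;> simp [hx] <;> ring

theorem pvScore_gap (y : String) :
    pvScore ("-", y) = if y = "-" then 0 else -2 := by
  by_cases hy : y = "-"
  · simp [pvScore, hy]
  · simp [pvScore, hy, show ("-" : String) ≠ y from fun h => hy h.symm]

theorem pvScore_nongap (x y : String) (hx : x ≠ "-") :
    pvScore (x, y) = if x = y then 1 else if y = "-" then -2 else -1 := by
  by_cases hxy : x = y
  · subst hxy; simp [pvScore, hx]
  · by_cases hy : y = "-" <;> simp [pvScore, hxy, hx, hy]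

theorem pv_row (x : String) (xs : List String) :
    ((xs.map (fun y => pvScore (x, y))).sum)
      = if x = "-" then -2 * pvM xs
        else 2 * (xs.count x : Int) - pvM xs - 2 * pvG xs := by
  induction xs with
  | nil => simp [pvM, pvG]
  | cons y ys ih =>
      simp only [List.map_cons, List.sum_cons, ih]
      rw [pvM_cons, pvG_cons, pv_count_cons]
      by_cases hx : x = "-"
      · subst hx
        rw [pvScore_gap, if_pos rfl, if_pos rfl]
        by_cases hy : y = "-" <;> simp [hy] <;> ring
      · rw [pvScore_nongap x y hx, if_neg hx, if_neg hx]
        by_cases hxy : x = y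
        · subst hxy
          simp [hx] ; ring
        · by_cases hy : y = "-" <;> simp [hxy, hy, hx] <;> ring

theorem pv_tsucc (c : Int) :
    PySem.Int.floordiv ((c + 1) * (c + 1 - 1)) 2 = PySem.Int.floordiv (c * (c - 1)) 2 + c := by
  rw [PySem.Int.floordiv_eq_ediv_of_pos (by norm_num : (0:Int) < 2),
    PySem.Int.floordiv_eq_ediv_of_pos (by norm_num : (0:Int) < 2)]
  have h : (c + 1) * (c + 1 - 1) = c * (c - 1) + c * 2 := by ring
  rw [h, Int.add_mul_ediv_right _ _ (by norm_num : (2:Int) ≠ 0)]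

theorem pv_main (xs : List String) :
    ((pvPairs xs).map pvScore).sum
      = 2 * pvPc xs - PySem.Int.floordiv (pvM xs * (pvM xs - 1)) 2 - 2 * pvG xs * pvM xs := by
  induction xs with
  | nil => simp [pvPairs, pvPc, pvM, pvG]
  | cons x xs ih =>
      simp only [pvPairs, List.map_append, List.sum_append, List.map_map, Function.comp_def,
        ih, pvPc]
      rw [pv_row, pvM_cons, pvG_cons]
      by_cases hx : x = "-"
      · rw [if_pos hx, if_pos hx, if_pos hx, if_pos hx]
        rw [add_zero]
        ring
      · rw [if_neg hx, if_neg hx, if_neg hx, if_neg hx]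
        rw [pv_tsucc]
        ring

-- ===== VERDICT (by name: the statement is the Claim_ definition above) =====
theorem column_cost_spec : Claim_equal_column_cost := by
  intro column _
  unfold Spec_column_cost
  have hB : column_cost_alt column
      = 2 * (pvCountLoop PySem.Dict.empty 0 column).2
        - PySem.Int.floordiv
            (((column.length : Int) - (pvCountLoop PySem.Dict.empty 0 column).1.getD "-" 0)
              * (((column.length : Int) - (pvCountLoop PySem.Dict.empty 0 column).1.getD "-" 0) - 1)) 2
        - 2 * (pvCountLoop PySem.Dict.empty 0 column).1.getD "-" 0
          * ((column.length : Int) - (pvCountLoop PySem.Dict.empty 0 column).1.getD "-" 0) := rfl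
  rw [hB, pv_loop_snd, pv_loop_fst, PySem.Dict.getD_foldl_insert_add_one]
  have hS : pvS PySem.Dict.empty column = 0 := by
    simp [pvS, PySem.Dict.getD_empty]
  rw [hS, column_cost, pv_foldl_score, pv_main]
  simp only [PySem.Dict.getD_empty, pvM, pvG]
  ring
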